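-- pv_equiv track=rewrite | github.com/DuckY-Y/CatanAI | Main.py | generate_hex_map
-- ===== SOURCE A (Python) =====
-- def generate_hex_map(max_layer, size):
--     hex_map = []
--     for layer in range(max_layer + 1):
--         for q in range(-layer, layer + 1):
--             for r in range(-layer, layer + 1):
--                 if abs(q + r) <= layer:
--                     hex_map.append((q, r))
--     return hex_map
-- ===== SOURCE B (Python) =====
-- def generate_hex_map(max_layer, size):
--     hex_map = []
--     for layer in range(max_layer + 1):
--         # build only the non-negative-q half of the layer's disk ...
--         upper = []
--         for q in range(0, layer + 1):
--             for r in range(-layer, layer - q + 1):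
--                 upper.append((q, r))
--         # ... and obtain the negative-q half by point symmetry (q,r) -> (-q,-r)
--         lower = [(-q, -r) for (q, r) in reversed(upper) if q != 0]
--         hex_map += lower + upper
--     return hex_map
-- ===== Notes on version B (the rewrite author's own statement) =====
-- stated objective: alternative
-- what changed: B generates only the non-negative-q half of each layer's disk (with an unguarded inner range) and obtains the negative-q half by the point symmetry (q,r)->(-q,-r) applied to the reversed upper half, instead of A's full square scan with an abs(q+r)<=layer filter.
import Mathlib
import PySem

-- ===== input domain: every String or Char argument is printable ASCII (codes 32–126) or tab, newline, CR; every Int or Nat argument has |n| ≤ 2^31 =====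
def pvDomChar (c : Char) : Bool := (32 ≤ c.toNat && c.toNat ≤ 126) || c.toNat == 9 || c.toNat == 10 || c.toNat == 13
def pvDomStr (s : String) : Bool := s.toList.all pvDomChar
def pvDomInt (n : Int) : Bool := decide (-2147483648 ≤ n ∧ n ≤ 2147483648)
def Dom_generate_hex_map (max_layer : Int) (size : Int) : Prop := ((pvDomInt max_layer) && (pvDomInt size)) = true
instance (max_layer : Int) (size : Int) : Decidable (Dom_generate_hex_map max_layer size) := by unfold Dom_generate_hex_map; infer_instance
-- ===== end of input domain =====

-- B builds only the non-negative-q half of each layer's disk and obtains the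
-- negative-q half by the point symmetry (q,r) ↦ (-q,-r): an alternative of the same cost.

-- ===== PORT A =====
def generate_hex_map (max_layer : Int) (size : Int) : List (Int × Int) :=
  (PySem.List.pyRange 0 (max_layer + 1) 1).foldl (fun hex_map layer =>
    (PySem.List.pyRange (-layer) (layer + 1) 1).foldl (fun hex_map q =>
      (PySem.List.pyRange (-layer) (layer + 1) 1).foldl (fun hex_map r =>
        if |q + r| ≤ layer then hex_map ++ [(q, r)] else hex_map) hex_map) hex_map) []

-- ===== PORT B =====
def generate_hex_map_alt (max_layer : Int) (size : Int) : List (Int × Int) :=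
  (PySem.List.pyRange 0 (max_layer + 1) 1).foldl (fun hex_map layer =>
    let upper := (PySem.List.pyRange 0 (layer + 1) 1).foldl (fun u q =>
      (PySem.List.pyRange (-layer) (layer - q + 1) 1).foldl (fun u r => u ++ [(q, r)]) u) []
    let lower := (upper.reverse.filter (fun p => decide (p.1 ≠ 0))).map (fun p => (-p.1, -p.2))
    hex_map ++ (lower ++ upper)) []

-- ===== PRECONDITION & SPEC =====
def Spec_generate_hex_map (max_layer : Int) (size : Int) (out : List (Int × Int)) : Prop := out = generate_hex_map_alt max_layer size
instance (max_layer : Int) (size : Int) (out : List (Int × Int)) : Decidable (Spec_generate_hex_map max_layer size out) := by unfold Spec_generate_hex_map; infer_instance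

-- ===== CLAIM (what is proved, stated in full; the proofs are below) =====
def Claim_equal_generate_hex_map : Prop := ∀ (max_layer : Int) (size : Int), Dom_generate_hex_map max_layer size → Spec_generate_hex_map max_layer size (generate_hex_map max_layer size)

-- ===== LEMMAS AND PROOFS =====

-- A's row for a given layer and q, after the guard is expressed as a filter.
def pvRowA (layer q : Int) : List (Int × Int) :=
  ((PySem.List.pyRange (-layer) (layer + 1) 1).filter (fun r => decide (|q + r| ≤ layer))).map (fun r => (q, r))

-- B's row for a given layer and 0 ≤ q.
def pvRowU (layer q : Int) : List (Int × Int) :=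
  (PySem.List.pyRange (-layer) (layer - q + 1) 1).map (fun r => (q, r))

-- The guard |q+r| ≤ layer clips a range of r to a computable interval.
theorem pvFilter_clip (layer q : Int) : ∀ (n : Nat) (a b : Int), (b - a).toNat = n →
    (PySem.List.pyRange a b 1).filter (fun r => decide (|q + r| ≤ layer))
      = PySem.List.pyRange (max a (-layer - q)) (min (b - 1) (layer - q) + 1) 1 := by
  intro n
  induction n with
  | zero =>
    intro a b hn
    rw [PySem.List.pyRange_one_eq_nil (by omega : b ≤ a),
        PySem.List.pyRange_one_eq_nil (by omega : min (b - 1) (layer - q) + 1 ≤ max a (-layer - q))]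
    rfl
  | succ k ih =>
    intro a b hn
    rw [PySem.List.pyRange_one_cons (by omega : a < b), List.filter_cons]
    by_cases h : |q + a| ≤ layer
    · rw [if_pos (by simpa using h)]
      rw [abs_le] at h
      rw [ih (a + 1) b (by omega)]
      have hmax : max (a + 1) (-layer - q) = a + 1 := by omega
      have hmax' : max a (-layer - q) = a := by omega
      rw [hmax, hmax', PySem.List.pyRange_one_cons (by omega : a < min (b - 1) (layer - q) + 1)]
    · rw [if_neg (by simpa using h)]
      rw [abs_le] at h
      push Not at h
      rw [ih (a + 1) b (by omega)]
      rcases (by omega : a < -layer - q ∨ layer - q < a) with hc | hc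
      · have : max (a + 1) (-layer - q) = max a (-layer - q) := by omega
        rw [this]
      · rw [PySem.List.pyRange_one_eq_nil (by omega),
            PySem.List.pyRange_one_eq_nil (by omega)]

-- Negating a reversed increasing range gives an increasing range.
theorem pvNeg_reverse_range : ∀ (n : Nat) (a b : Int), (b - a).toNat = n →
    ((PySem.List.pyRange a b 1).reverse).map (fun r => -r) = PySem.List.pyRange (1 - b) (1 - a) 1 := by
  intro n
  induction n with
  | zero =>
    intro a b hn
    rw [PySem.List.pyRange_one_eq_nil (by omega : b ≤ a),
        PySem.List.pyRange_one_eq_nil (by omega : 1 - a ≤ 1 - b)]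
    rfl
  | succ k ih =>
    intro a b hn
    rw [PySem.List.pyRange_one_cons (by omega : a < b), List.reverse_cons, List.map_append,
        ih (a + 1) b (by omega)]
    have h1 : (1 : Int) - (a + 1) = -a := by ring
    have h2 : PySem.List.pyRange (1 - b) (-a + 1) 1 = PySem.List.pyRange (1 - b) (-a) 1 ++ [-a] :=
      PySem.List.pyRange_one_succ_right (by omega : 1 - b ≤ -a)
    simp only [h1, List.map_cons, List.map_nil]
    rw [show (1 : Int) - a = -a + 1 by ring, h2]

-- Per-layer equality: A's guarded square scan equals B's symmetry construction.
theorem pvLayer_eq (layer : Int) :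
    (PySem.List.pyRange (-layer) (layer + 1) 1).flatMap (pvRowA layer)
      = (let upper := (PySem.List.pyRange 0 (layer + 1) 1).flatMap (pvRowU layer)
         (upper.reverse.filter (fun p => decide (p.1 ≠ 0))).map (fun p => (-p.1, -p.2)) ++ upper) := by
  by_cases hl : 0 ≤ layer
  · -- split A's q-range at 0
    rw [PySem.List.pyRange_one_append (-layer) 0 (layer + 1) (by omega) (by omega),
        List.flatMap_append]
    -- the non-negative half: A's clipped rows coincide with B's rows
    have hpos : (PySem.List.pyRange 0 (layer + 1) 1).flatMap (pvRowA layer)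
        = (PySem.List.pyRange 0 (layer + 1) 1).flatMap (pvRowU layer) := by
      apply List.flatMap_congr
      intro q hq
      rw [PySem.List.mem_pyRange_one] at hq
      unfold pvRowA pvRowU
      rw [pvFilter_clip layer q _ (-layer) (layer + 1) rfl]
      have h1 : max (-layer) (-layer - q) = -layer := by omega
      have h2 : min (layer + 1 - 1) (layer - q) = layer - q := by omega
      rw [h1, h2]
    rw [hpos]
    -- the negative half equals B's mirrored list
    have hneg : (PySem.List.pyRange (-layer) 0 1).flatMap (pvRowA layer)
        = ((((PySem.List.pyRange 0 (layer + 1) 1).flatMap (pvRowU layer)).reverse.filter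
              (fun p => decide (p.1 ≠ 0))).map (fun p => (-p.1, -p.2))) := by
      -- peel off the q = 0 row, whose elements the filter removes
      rw [PySem.List.pyRange_one_append 0 1 (layer + 1) (by omega) (by omega),
          List.flatMap_append,
          (by decide : PySem.List.pyRange 0 1 1 = [(0 : Int)]), List.flatMap_cons,
          List.flatMap_nil, List.append_nil, List.reverse_append, List.filter_append,
          List.reverse_flatMap]
      have hzero : ((pvRowU layer 0).reverse).filter (fun p => decide (p.1 ≠ 0)) = [] := by
        unfold pvRowU
        rw [← List.map_reverse, List.filter_map]
        simp
      rw [hzero, List.append_nil, List.filter_flatMap, List.map_flatMap]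
      -- reindex the negative q's through q ↦ -q
      have hidx : PySem.List.pyRange (-layer) 0 1
          = ((PySem.List.pyRange 1 (layer + 1) 1).reverse).map (fun q => -q) := by
        rw [pvNeg_reverse_range _ 1 (layer + 1) rfl]
        norm_num
      rw [hidx, List.flatMap_map]
      apply List.flatMap_congr
      intro q hq
      rw [List.mem_reverse, PySem.List.mem_pyRange_one] at hq
      show pvRowA layer (-q)
          = (((pvRowU layer q).reverse).filter (fun p => decide (p.1 ≠ 0))).map (fun p => (-p.1, -p.2))
      unfold pvRowA pvRowU
      rw [pvFilter_clip layer (-q) _ (-layer) (layer + 1) rfl]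
      have h1 : max (-layer) (-layer - -q) = q - layer := by omega
      have h2 : min (layer + 1 - 1) (layer - -q) = layer := by omega
      rw [h1, h2, ← List.map_reverse, List.filter_map, List.map_map]
      have hfilter : ((PySem.List.pyRange (-layer) (layer - q + 1) 1).reverse).filter
          ((fun p : Int × Int => decide (p.1 ≠ 0)) ∘ fun r => (q, r))
          = (PySem.List.pyRange (-layer) (layer - q + 1) 1).reverse := by
        apply List.filter_eq_self.mpr
        intro r _
        simp only [Function.comp]
        simpa using (by omega : q ≠ 0)
      rw [hfilter]
      have hrange : PySem.List.pyRange (q - layer) (layer + 1) 1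
          = ((PySem.List.pyRange (-layer) (layer - q + 1) 1).reverse).map (fun r => -r) := by
        rw [pvNeg_reverse_range _ (-layer) (layer - q + 1) rfl]
        have : (1 : Int) - (layer - q + 1) = q - layer := by ring
        rw [this]
        norm_num
        rw [Int.add_comm]
      rw [hrange, List.map_map]
      rfl
    rw [hneg]
  · -- negative layer: both sides are empty
    rw [PySem.List.pyRange_one_eq_nil (by omega : layer + 1 ≤ -layer),
        PySem.List.pyRange_one_eq_nil (by omega : layer + 1 ≤ 0)]
    rfl

-- ===== VERDICT (by name: the statement is the Claim_ definition above) =====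
theorem generate_hex_map_spec : Claim_equal_generate_hex_map := by
  intro max_layer size _
  unfold Spec_generate_hex_map generate_hex_map generate_hex_map_alt
  have hA : ∀ (acc : List (Int × Int)) (layer : Int),
      (PySem.List.pyRange (-layer) (layer + 1) 1).foldl (fun hex_map q =>
        (PySem.List.pyRange (-layer) (layer + 1) 1).foldl (fun hex_map r =>
          if |q + r| ≤ layer then hex_map ++ [(q, r)] else hex_map) hex_map) acc
      = acc ++ (PySem.List.pyRange (-layer) (layer + 1) 1).flatMap (pvRowA layer) := by
    intro acc layer
    have hin : (fun (hex_map : List (Int × Int)) (q : Int) =>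
        (PySem.List.pyRange (-layer) (layer + 1) 1).foldl (fun hex_map r =>
          if |q + r| ≤ layer then hex_map ++ [(q, r)] else hex_map) hex_map)
        = fun hex_map q => hex_map ++ pvRowA layer q := by
      funext hm q
      exact PySem.List.foldl_append_ite (fun r => |q + r| ≤ layer) (fun r => (q, r)) _ _
    rw [hin, PySem.List.foldl_append_eq_flatMap]
  have hB : ∀ (acc : List (Int × Int)) (layer : Int),
      (PySem.List.pyRange 0 (layer + 1) 1).foldl (fun u q =>
        (PySem.List.pyRange (-layer) (layer - q + 1) 1).foldl (fun u r => u ++ [(q, r)]) u) acc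
      = acc ++ (PySem.List.pyRange 0 (layer + 1) 1).flatMap (pvRowU layer) := by
    intro acc layer
    have hin : (fun (u : List (Int × Int)) (q : Int) =>
        (PySem.List.pyRange (-layer) (layer - q + 1) 1).foldl (fun u r => u ++ [(q, r)]) u)
        = fun u q => u ++ pvRowU layer q := by
      funext u q
      exact PySem.List.foldl_append_singleton_eq_map _ _ _
    rw [hin, PySem.List.foldl_append_eq_flatMap]
  have hfun : (fun (hex_map : List (Int × Int)) (layer : Int) =>
      (PySem.List.pyRange (-layer) (layer + 1) 1).foldl (fun hex_map q =>
        (PySem.List.pyRange (-layer) (layer + 1) 1).foldl (fun hex_map r =>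
          if |q + r| ≤ layer then hex_map ++ [(q, r)] else hex_map) hex_map) hex_map)
      = (fun (hex_map : List (Int × Int)) (layer : Int) =>
      let upper := (PySem.List.pyRange 0 (layer + 1) 1).foldl (fun u q =>
        (PySem.List.pyRange (-layer) (layer - q + 1) 1).foldl (fun u r => u ++ [(q, r)]) u) []
      let lower := (upper.reverse.filter (fun p => decide (p.1 ≠ 0))).map (fun p => (-p.1, -p.2))
      hex_map ++ (lower ++ upper)) := by
    funext acc layer
    rw [hA acc layer]
    show _ = (let upper := (PySem.List.pyRange 0 (layer + 1) 1).foldl (fun u q =>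
        (PySem.List.pyRange (-layer) (layer - q + 1) 1).foldl (fun u r => u ++ [(q, r)]) u) []
      let lower := (upper.reverse.filter (fun p => decide (p.1 ≠ 0))).map (fun p => (-p.1, -p.2))
      acc ++ (lower ++ upper))
    rw [hB ([] : List (Int × Int)) layer, List.nil_append]
    rw [pvLayer_eq layer]
  rw [hfun]
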